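-- pv_equiv track=rewrite | github.com/leemimi/CodingTest | 프로그래머스/lv1/131128. 숫자 짝꿍/숫자 짝꿍.py | solution
-- ===== SOURCE A (Python) =====
-- def solution(X, Y):
--     answer = []
--
--     xdict = dict()
--     ydict = dict()
--
--     for x in X:
--         xdict[x] = xdict.get(x,0)+1
--
--     for y in Y:
--         ydict[y] = ydict.get(y,0)+1
--
--     for k,y in xdict.items():
--         if k in ydict.keys():
--             while ydict[k]>0 and xdict[k]>0:
--                 answer.append(k)
--                 ydict[k]=ydict.get(k)-1
--                 xdict[k]=xdict.get(k)-1
--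
--     if len(answer) <1 : return "-1"
--     if (answer.count("0")==len(answer)): return "0"
--
--     answer.sort(reverse=True)
--
--     return ''.join(answer)
-- ===== SOURCE B (Python) =====
-- def solution(X, Y):
--     xcnt = {}
--     for x in X:
--         xcnt[x] = xcnt.get(x, 0) + 1
--     ycnt = {}
--     for y in Y:
--         ycnt[y] = ycnt.get(y, 0) + 1
--     pieces = []
--     for code in range(127, -1, -1):
--         ch = chr(code)
--         pieces.append(ch * min(xcnt.get(ch, 0), ycnt.get(ch, 0)))
--     s = ''.join(pieces)
--     if not s:
--         return "-1"
--     if set(s) == {"0"}: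
--         return "0"
--     return s
-- ===== Notes on version B (the rewrite author's own statement) =====
-- stated objective: faster
-- what changed: Instead of walking xdict.items with a per-character decrementing while-loop and then sorting the collected characters descending, B counts once and emits each character block directly in descending code order (127..0) with string repetition, so no sort and no per-character append are needed.
import Mathlib
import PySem

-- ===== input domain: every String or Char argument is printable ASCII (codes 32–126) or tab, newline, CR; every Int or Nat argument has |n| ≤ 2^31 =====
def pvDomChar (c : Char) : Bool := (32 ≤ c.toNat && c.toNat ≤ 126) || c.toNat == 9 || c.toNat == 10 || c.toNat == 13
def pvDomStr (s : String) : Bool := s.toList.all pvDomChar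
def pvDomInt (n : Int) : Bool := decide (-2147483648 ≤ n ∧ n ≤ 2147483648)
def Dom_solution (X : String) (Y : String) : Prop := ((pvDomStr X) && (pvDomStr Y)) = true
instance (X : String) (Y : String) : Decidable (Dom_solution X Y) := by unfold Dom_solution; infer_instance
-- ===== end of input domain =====

-- B replaces A's items/while-loop collection followed by a descending sort with one
-- descending scan over character codes 127..0 emitting each character block directly (no sort).

-- ===== PORT A =====
-- the 'while ydict[k]>0 and xdict[k]>0: answer.append(k); ydict[k]-=1; xdict[k]-=1' loop;
-- ydict[k]/xdict[k] are read as getD _ 0: exact here, since the loop is only entered when both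
-- keys are present (k comes from xdict.items and the guard 'k in ydict.keys()').
def solutionWhile (k : Char) (xd yd : PySem.Dict Char Int) (answer : List Char) :
    PySem.Dict Char Int × PySem.Dict Char Int × List Char :=
  if 0 < yd.getD k 0 ∧ 0 < xd.getD k 0 then
    solutionWhile k (xd.insert k (xd.getD k 0 - 1)) (yd.insert k (yd.getD k 0 - 1))
      (answer ++ [k])
  else (xd, yd, answer)
termination_by (xd.getD k 0).toNat
decreasing_by simp [PySem.Dict.getD_insert_self]; omega

def solution (X : String) (Y : String) : String :=
  let answer : List Char := []
  let xdict := X.toList.foldl (fun d x => d.insert x (d.getD x 0 + 1)) PySem.Dict.empty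
  let ydict := Y.toList.foldl (fun d y => d.insert y (d.getD y 0 + 1)) PySem.Dict.empty
  let st := xdict.items.foldl
      (fun st p => if st.2.1.contains p.1 then solutionWhile p.1 st.1 st.2.1 st.2.2 else st)
      (xdict, ydict, answer)
  let answer := st.2.2
  if PySem.List.len answer < 1 then "-1"
  else if (PySem.List.count answer '0' : Int) = PySem.List.len answer then "0"
  else String.mk (PySem.List.sorted answer (fun c => c) true)

-- ===== PORT B =====
-- chr(code) for code in 0..127 is Char.ofNat code.toNat (exact: all these codes are valid scalar values)
def solution_alt (X : String) (Y : String) : String :=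
  let xcnt := X.toList.foldl (fun d x => d.insert x (d.getD x 0 + 1)) PySem.Dict.empty
  let ycnt := Y.toList.foldl (fun d y => d.insert y (d.getD y 0 + 1)) PySem.Dict.empty
  let pieces := (PySem.List.pyRange 127 (-1) (-1)).foldl
      (fun acc code =>
        let ch := Char.ofNat code.toNat
        acc ++ [PySem.List.pyRepeat [ch] (min (xcnt.getD ch 0) (ycnt.getD ch 0))]) []
  let s := PySem.Chars.join [] pieces
  if s = [] then "-1"
  else if PySem.Set.equal (PySem.Set.ofList s) (PySem.Set.ofList ['0']) then "0"
  else String.mk s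

-- ===== PRECONDITION & SPEC =====
def Spec_solution (X : String) (Y : String) (out : String) : Prop := out = solution_alt X Y
instance (X : String) (Y : String) (out : String) : Decidable (Spec_solution X Y out) := by unfold Spec_solution; infer_instance

-- ===== CLAIM (what is proved, stated in full; the proofs are below) =====
def Claim_equal_solution : Prop := ∀ (X : String) (Y : String), Dom_solution X Y → Spec_solution X Y (solution X Y)

-- ===== LEMMAS AND PROOFS =====

-- min(count X, count Y): the number of copies of a character both programs keep
def pvM (X Y : String) (c : Char) : Nat := min (X.toList.count c) (Y.toList.count c)

-- the character codes 127..0 as characters, B's emission order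
def pvDesc : List Char := (List.range 128).reverse.map (fun n => Char.ofNat n)

-- the while loop appends exactly min(xd[k], yd[k]) copies of k
theorem solutionWhile_answer (k : Char) (xd yd : PySem.Dict Char Int) (ans : List Char) :
    (solutionWhile k xd yd ans).2.2
      = ans ++ List.replicate (min (xd.getD k 0) (yd.getD k 0)).toNat k := by
  fun_induction solutionWhile k xd yd ans with
  | case1 xd yd ans h ih =>
    rw [ih]
    simp only [PySem.Dict.getD_insert_self]
    have h1 : (min (xd.getD k 0 - 1) (yd.getD k 0 - 1)).toNat + 1
        = (min (xd.getD k 0) (yd.getD k 0)).toNat := by omega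
    rw [← h1, List.replicate_succ]
    simp
  | case2 xd yd ans h => simp; omega

-- the while loop does not change counts / membership at other keys
theorem solutionWhile_other (k : Char) (xd yd : PySem.Dict Char Int) (ans : List Char)
    (k' : Char) (hk : k' ≠ k) :
    (solutionWhile k xd yd ans).1.getD k' 0 = xd.getD k' 0 ∧
    (solutionWhile k xd yd ans).2.1.getD k' 0 = yd.getD k' 0 ∧
    (solutionWhile k xd yd ans).2.1.contains k' = yd.contains k' := by
  fun_induction solutionWhile k xd yd ans with
  | case1 xd yd ans h ih =>
    obtain ⟨h1, h2, h3⟩ := ih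
    refine ⟨?_, ?_, ?_⟩
    · rw [h1]; simp [PySem.Dict.getD_insert, hk]
    · rw [h2]; simp [PySem.Dict.getD_insert, hk]
    · rw [h3, PySem.Dict.contains_insert]
      simp [hk]
  | case2 xd yd ans h => exact ⟨rfl, rfl, rfl⟩

-- the item loop, characterised against snapshot functions of the initial dicts
theorem solution_fold_spec (cx cy : Char → Int) (cont : Char → Bool) :
    ∀ (ps : List (Char × Int)) (xd yd : PySem.Dict Char Int) (ans : List Char),
    (ps.map Prod.fst).Nodup →
    (∀ k ∈ ps.map Prod.fst, xd.getD k 0 = cx k ∧ yd.getD k 0 = cy k ∧ yd.contains k = cont k) →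
    (ps.foldl
      (fun st p => if st.2.1.contains p.1 then solutionWhile p.1 st.1 st.2.1 st.2.2 else st)
      (xd, yd, ans)).2.2
      = ans ++ ps.flatMap (fun p =>
          if cont p.1 then List.replicate (min (cx p.1) (cy p.1)).toNat p.1 else []) := by
  intro ps
  induction ps with
  | nil => intro xd yd ans _ _; simp
  | cons p ps ih =>
    intro xd yd ans hnd hag
    have hp := hag p.1 (by simp)
    have hnd' : (ps.map Prod.fst).Nodup := by simp at hnd; exact hnd.2
    have hnotin : p.1 ∉ ps.map Prod.fst := by simp at hnd; simpa using hnd.1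
    simp only [List.foldl_cons, List.flatMap_cons]
    by_cases hc : cont p.1 = true
    · rw [show ((xd, yd, ans).2.1.contains p.1) = true by rw [hp.2.2]; exact hc]
      simp only [hc, if_pos]
      have hrec := ih (solutionWhile p.1 xd yd ans).1 (solutionWhile p.1 xd yd ans).2.1
        (solutionWhile p.1 xd yd ans).2.2 hnd' ?_
      · rw [hrec, solutionWhile_answer, hp.1, hp.2.1, List.append_assoc]
      · intro k hk
        have hkne : k ≠ p.1 := fun he => hnotin (he ▸ hk)
        obtain ⟨e1, e2, e3⟩ := solutionWhile_other p.1 xd yd ans k hkne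
        exact ⟨e1.trans (hag k (by simp [hk])).1, e2.trans (hag k (by simp [hk])).2.1,
          e3.trans (hag k (by simp [hk])).2.2⟩
    · have hc' : cont p.1 = false := by simpa using hc
      rw [show ((xd, yd, ans).2.1.contains p.1) = false by rw [hp.2.2]; exact hc']
      simp only [Bool.false_eq_true, hc']
      exact ih xd yd ans hnd' (fun k hk => hag k (by simp [hk]))

-- counting in a block-concatenation over distinct block heads
theorem count_flatMap_replicate (m : Char → Nat) :
    ∀ (L : List Char), L.Nodup → ∀ (c : Char),
    (L.flatMap (fun k => List.replicate (m k) k)).count c = if c ∈ L then m c else 0 := by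
  intro L
  induction L with
  | nil => simp
  | cons a L ih =>
    intro hnd c
    simp only [List.flatMap_cons, List.count_append, List.mem_cons]
    rw [ih hnd.of_cons c]
    by_cases hca : c = a
    · subst hca
      simp [(List.nodup_cons.mp hnd).1]
    · simp [List.count_replicate, hca, Ne.symm hca]

-- block-concatenation over a strictly descending head list is descending
theorem pairwise_flatMap_replicate (m : Char → Nat) :
    ∀ (L : List Char), L.Pairwise (fun a b => b < a) →
    (L.flatMap (fun k => List.replicate (m k) k)).Pairwise (fun a b => b ≤ a) := by
  intro L
  induction L with
  | nil => simp
  | cons a L ih =>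
    intro hp
    simp only [List.flatMap_cons]
    rw [List.pairwise_append]
    refine ⟨by simp [List.pairwise_replicate], ih hp.of_cons, ?_⟩
    intro x hx y hy
    rw [List.eq_of_mem_replicate hx]
    obtain ⟨k, hk, hyk⟩ := List.mem_flatMap.mp hy
    rw [List.eq_of_mem_replicate hyk]
    exact ((List.pairwise_cons.mp hp).1 k hk).le

-- ''.join over a list of pieces is flatten
theorem join_nil_eq_flatten :
    ∀ (cs : List (List Char)), PySem.Chars.join [] cs = cs.flatten := by
  intro cs
  induction cs with
  | nil => rfl
  | cons a cs ih =>
    cases cs with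
    | nil => simp [PySem.Chars.join_singleton]
    | cons b cs => rw [PySem.Chars.join_cons_cons, List.flatten_cons, ih]; simp

set_option maxRecDepth 8192 in
theorem pvDesc_nodup : pvDesc.Nodup := by decide

set_option maxRecDepth 8192 in
theorem pvDesc_pairwise : pvDesc.Pairwise (fun a b => b < a) := by decide

theorem mem_pvDesc (c : Char) (h : c.toNat < 128) : c ∈ pvDesc := by
  simp only [pvDesc, List.mem_map, List.mem_reverse, List.mem_range]
  exact ⟨c.toNat, h, Char.ofNat_toNat c⟩

theorem pvRange_desc : PySem.List.pyRange 127 (-1) (-1)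
    = (List.range 128).reverse.map (fun n => Int.ofNat n) := by decide

-- A's collected answer list
theorem ansA_eq (X Y : String) :
    ((PySem.Dict.counter X.toList).items.foldl
      (fun st p => if st.2.1.contains p.1 then solutionWhile p.1 st.1 st.2.1 st.2.2 else st)
      (PySem.Dict.counter X.toList, PySem.Dict.counter Y.toList, ([] : List Char))).2.2
    = (PySem.Set.ofList X.toList).flatMap (fun k => List.replicate (pvM X Y k) k) := by
  rw [solution_fold_spec (fun k => (X.toList.count k : Int)) (fun k => (Y.toList.count k : Int))
      (fun k => Y.toList.contains k)]
  · rw [PySem.Dict.items_counter, List.flatMap_map]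
    simp only [List.nil_append]
    congr 1
    funext k
    by_cases hk : Y.toList.contains k = true
    · simp only [hk, if_pos]
      congr 1
      simp only [pvM]
      omega
    · have : Y.toList.count k = 0 := by
        rw [List.count_eq_zero]
        simpa using hk
      simp [pvM, this]
  · rw [PySem.Dict.items_counter, List.map_map]
    simp only [Function.comp_def]
    rw [List.map_id_fun']
    exact PySem.Set.nodup_ofList X.toList
  · intro k _
    exact ⟨PySem.Dict.getD_counter _ _, PySem.Dict.getD_counter _ _,
      PySem.Dict.contains_counter _ _⟩

-- B's joined string
theorem sB_eq (X Y : String) :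
    PySem.Chars.join []
      ((PySem.List.pyRange 127 (-1) (-1)).foldl
        (fun acc code =>
          acc ++ [PySem.List.pyRepeat [Char.ofNat code.toNat]
            (min ((PySem.Dict.counter X.toList).getD (Char.ofNat code.toNat) 0)
                 ((PySem.Dict.counter Y.toList).getD (Char.ofNat code.toNat) 0))]) [])
    = pvDesc.flatMap (fun k => List.replicate (pvM X Y k) k) := by
  rw [PySem.List.foldl_append_singleton_eq_map, join_nil_eq_flatten, List.nil_append,
    pvRange_desc, List.map_map]
  have : ((fun code : Int =>
        PySem.List.pyRepeat [Char.ofNat code.toNat]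
          (min ((PySem.Dict.counter X.toList).getD (Char.ofNat code.toNat) 0)
               ((PySem.Dict.counter Y.toList).getD (Char.ofNat code.toNat) 0)))
      ∘ (fun n : Nat => Int.ofNat n))
      = (fun k => List.replicate (pvM X Y k) k) ∘ (fun n : Nat => Char.ofNat n) := by
    funext n
    simp only [Function.comp_def, show ∀ k : Nat, (Int.ofNat k).toNat = k from fun _ => rfl,
      PySem.List.pyRepeat_singleton, PySem.Dict.getD_counter]
    congr 1
    simp only [pvM]
    omega
  rw [this, ← List.map_map, ← List.flatMap_def]
  rfl

-- ===== VERDICT (by name: the statement is the Claim_ definition above) =====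
theorem solution_spec : Claim_equal_solution := by
  intro X Y hDom
  unfold Spec_solution solution solution_alt
  simp only [PySem.Dict.foldl_insert_getD_add_one_eq_counter]
  rw [ansA_eq X Y, sB_eq X Y]
  set m := pvM X Y with hm
  set a := (PySem.Set.ofList X.toList).flatMap (fun k => List.replicate (m k) k) with ha
  set s := pvDesc.flatMap (fun k => List.replicate (m k) k) with hs
  -- every character of X lies in pvDesc (domain: codes ≤ 126 < 128)
  have hXdesc : ∀ c ∈ X.toList, c ∈ pvDesc := by
    intro c hc
    apply mem_pvDesc
    have : pvDomStr X = true := by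
      simp only [Dom_solution, Bool.and_eq_true] at hDom; exact hDom.1
    simp only [pvDomStr, List.all_eq_true] at this
    have := this c hc
    simp only [pvDomChar, Bool.or_eq_true, Bool.and_eq_true, decide_eq_true_eq, beq_iff_eq] at this
    omega
  -- counts agree with m on both sides
  have hcA : ∀ c, a.count c = m c := by
    intro c
    rw [ha, count_flatMap_replicate m _ (PySem.Set.nodup_ofList X.toList) c]
    by_cases hc : c ∈ PySem.Set.ofList X.toList
    · simp [hc]
    · have hcx : X.toList.count c = 0 := by
        rw [List.count_eq_zero]
        intro hmem
        exact hc ((PySem.Set.mem_ofList X.toList c).mpr hmem)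
      simp [hc, hm, pvM, hcx]
  have hcB : ∀ c, s.count c = m c := by
    intro c
    rw [hs, count_flatMap_replicate m _ pvDesc_nodup c]
    by_cases hc : c ∈ pvDesc
    · simp [hc]
    · have hcx : X.toList.count c = 0 := by
        rw [List.count_eq_zero]
        intro hmem
        exact hc (hXdesc c hmem)
      simp [hc, hm, pvM, hcx]
  have hperm : a.Perm s := List.perm_iff_count.mpr (fun c => by rw [hcA, hcB])
  have hlen : a.length = s.length := hperm.length_eq
  have hsorted : PySem.List.sorted a (fun c => c) true = s := by
    apply List.Perm.eq_of_pairwise (le := fun x y : Char => y ≤ x)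
    · intro x y _ _ h1 h2
      exact le_antisymm h2 h1
    · exact PySem.List.sorted_pairwise_rev a (fun c => c)
    · exact pairwise_flatMap_replicate m pvDesc pvDesc_pairwise
    · exact (PySem.List.sorted_perm a (fun c => c) true).trans hperm
  by_cases h0 : a = []
  · have hs0 : s = [] := List.eq_nil_of_length_eq_zero (by rw [← hlen, h0]; rfl)
    rw [if_pos, if_pos hs0]
    simp [h0, PySem.List.len_eq]
  · have hs0 : s ≠ [] := fun he => h0 (List.eq_nil_of_length_eq_zero (by rw [hlen, he]; rfl))
    rw [if_neg, if_neg hs0]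
    · by_cases hz : ∀ b ∈ a, '0' = b
      · rw [if_pos, if_pos]
        · rw [PySem.Set.equal_iff]
          intro x
          rw [PySem.Set.mem_ofList, PySem.Set.mem_ofList, List.mem_singleton]
          constructor
          · intro hx
            exact (hz x (hperm.symm.subset hx)).symm
          · intro hx
            subst hx
            obtain ⟨y, hy⟩ := List.exists_mem_of_ne_nil s hs0
            have : ('0' : Char) = y := hz y (hperm.symm.subset hy)
            rwa [this]
        · rw [PySem.List.count_eq, PySem.List.len_eq]
          exact_mod_cast congrArg Nat.cast (List.count_eq_length.mpr hz)
      · rw [if_neg, if_neg, hsorted]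
        · -- B's all-'0' test fails too
          intro hEq
          rw [PySem.Set.equal_iff] at hEq
          apply hz
          intro b hb
          have : b ∈ PySem.Set.ofList s := (PySem.Set.mem_ofList s b).mpr (hperm.subset hb)
          have := (hEq b).mp this
          rw [PySem.Set.mem_ofList, List.mem_singleton] at this
          exact this.symm
        · rw [PySem.List.count_eq, PySem.List.len_eq]
          intro hEq
          apply hz
          exact List.count_eq_length.mp (by exact_mod_cast hEq)
    · simp only [PySem.List.len_eq]
      simp only [not_lt]
      have : 0 < a.length := List.length_pos_of_ne_nil h0
      omega
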